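-- pv_equiv track=rewrite | github.com/myst-6/ukoly | public/assets/code/parsinglists/sol.py | solve
-- ===== SOURCE A (Python) =====
-- def e(i):
--     return 2 * i
--
-- def o(i):
--     return 2 * i - 1
--
-- def last_position_of_element_in_t(x):
--     return (x * (x + 1)) // 2
--
-- def t(i):
--     # kind of binary search
--
--     left = 0
--     right = 2 ** 61
--
--     while left <= right:
--         mid = left + (right-left)//2
--         if last_position_of_element_in_t(mid) >= i > last_position_of_element_in_t(mid-1):
--             break
--         elif last_position_of_element_in_t(mid) < i:
--             left = mid + 1
--         else:
--             right = mid - 1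
--
--     return mid
--
-- def solve(tokens, i):
--     answer = i
--     for token in tokens[::-1]:
--         if token == "E":
--             answer = e(answer)
--         elif token == "O":
--             answer = o(answer)
--         elif token == "T":
--             answer = t(answer)
--
--     return answer
-- ===== SOURCE B (Python) =====
-- # B: t computed by a closed-form inverse of the triangular numbers (iterative integer
-- # square root over the n//4 chain) instead of A's 62-step binary search over [0, 2**61];
-- # min(x, 2**61) reproduces A's search-range cap and t(i)=0 for i<=0 as in A.
--
-- def _isqrt(n):
--     # floor integer square root: descend n -> n//4, then rebuild the root digit by digit
--     chain = []
--     m = n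
--     while m > 0:
--         chain.append(m)
--         m = m // 4
--     r = 0
--     for m in reversed(chain):
--         r = 2 * r + 1 if (2 * r + 1) * (2 * r + 1) <= m else 2 * r
--     return r
--
-- def _t(i):
--     if i <= 0:
--         return 0
--     s = _isqrt(8 * i + 1)
--     x = (s - 1) // 2
--     if x * (x + 1) // 2 < i:
--         x += 1
--     return min(x, 2 ** 61)
--
-- def _step(token, answer):
--     if token == "E":
--         return 2 * answer
--     elif token == "O":
--         return 2 * answer - 1
--     elif token == "T":
--         return _t(answer)
--     return answer
--
-- def solve(tokens, i):
--     answer = i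
--     for token in reversed(tokens):
--         answer = _step(token, answer)
--     return answer
-- ===== Notes on version B (the rewrite author's own statement) =====
-- stated objective: alternative
-- what changed: t's 62-iteration binary search over [0, 2^61] is replaced by a closed-form inverse of the triangular numbers (digit-by-digit integer square root of 8i+1 plus at most one correction step, capped like A's search range); solve keeps a single reversed pass with one dispatch helper.
import Mathlib
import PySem

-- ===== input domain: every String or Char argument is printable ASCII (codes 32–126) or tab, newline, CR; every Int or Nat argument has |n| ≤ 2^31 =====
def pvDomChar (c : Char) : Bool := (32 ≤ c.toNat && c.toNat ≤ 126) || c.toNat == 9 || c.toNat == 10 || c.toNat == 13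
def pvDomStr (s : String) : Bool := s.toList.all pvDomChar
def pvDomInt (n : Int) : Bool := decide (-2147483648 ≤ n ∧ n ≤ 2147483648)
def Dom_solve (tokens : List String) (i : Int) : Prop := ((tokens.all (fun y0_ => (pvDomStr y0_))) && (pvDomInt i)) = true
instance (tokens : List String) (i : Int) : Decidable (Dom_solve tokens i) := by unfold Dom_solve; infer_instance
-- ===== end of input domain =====

-- B replaces A's 62-step binary search in t by a closed-form inverse of the triangular numbers
-- (recursive integer square root) and recurses on the token list; same return values.

-- ===== PORT A =====
def eA (i : Int) : Int := 2 * i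

def oA (i : Int) : Int := 2 * i - 1

def lastPos (x : Int) : Int := PySem.Int.floordiv (x * (x + 1)) 2

-- the while-loop of t; Python's `mid` survives the loop, so it is threaded as a parameter.
-- `fuel` is only a totality guard: the interval shrinks each step, so fuel > right - left
-- (as supplied by tA below) never runs out; the loop body itself is step-for-step Python's.
def tLoopF (fuel : Nat) (i left right mid : Int) : Int :=
  match fuel with
  | 0 => mid
  | fuel + 1 =>
    if left ≤ right then
      let m := left + PySem.Int.floordiv (right - left) 2
      if lastPos m ≥ i ∧ i > lastPos (m - 1) then m
      else if lastPos m < i then tLoopF fuel i (m + 1) right m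
      else tLoopF fuel i left (m - 1) m
    else mid

def tA (i : Int) : Int := tLoopF (2 ^ 61 + 1) i 0 (2 ^ 61) 0

def solve (tokens : List String) (i : Int) : Int :=
  -- tokens[::-1]: slice? with step -1 (always `some`); loop = foldl over it
  ((PySem.List.slice? tokens none none (-1)).getD []).foldl
    (fun answer token =>
      if token = "E" then eA answer
      else if token = "O" then oA answer
      else if token = "T" then tA answer
      else answer) i

-- ===== PORT B =====
-- Source B _isqrt: the descending n // 4 chain (while-loop; fuel is only a totality guard,
-- never exhausted when fuel ≥ n.toNat as supplied by isqB below)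
def chainF (fuel : Nat) (m : Int) : List Int :=
  match fuel with
  | 0 => []
  | fuel + 1 => if 0 < m then m :: chainF fuel (PySem.Int.floordiv m 4) else []

-- Source B _isqrt's rebuild step: r -> the next binary digit of the root
def stepIsq (r m : Int) : Int :=
  if (2 * r + 1) * (2 * r + 1) ≤ m then 2 * r + 1 else 2 * r

def isqB (n : Int) : Int := ((chainF n.toNat n).reverse).foldl stepIsq 0

-- Source B _t
def tB (i : Int) : Int :=
  if i ≤ 0 then 0
  else
    let s := isqB (8 * i + 1)
    let x := PySem.Int.floordiv (s - 1) 2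
    let x' := if PySem.Int.floordiv (x * (x + 1)) 2 < i then x + 1 else x
    min x' (2 ^ 61)

-- Source B _step
def stepB (token : String) (answer : Int) : Int :=
  if token = "E" then 2 * answer
  else if token = "O" then 2 * answer - 1
  else if token = "T" then tB answer
  else answer

def solve_alt (tokens : List String) (i : Int) : Int :=
  tokens.reverse.foldl (fun answer token => stepB token answer) i

-- ===== PRECONDITION & SPEC =====
def Spec_solve (tokens : List String) (i : Int) (out : Int) : Prop := out = solve_alt tokens i
instance (tokens : List String) (i : Int) (out : Int) : Decidable (Spec_solve tokens i out) := by unfold Spec_solve; infer_instance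

-- ===== CLAIM (what is proved, stated in full; the proofs are below) =====
def Claim_equal_solve : Prop := ∀ (tokens : List String) (i : Int), Dom_solve tokens i → Spec_solve tokens i (solve tokens i)

-- ===== LEMMAS AND PROOFS =====

theorem lastPos_double (x : Int) : 2 * lastPos x = x * (x + 1) := by
  rcases Int.even_mul_succ_self x with ⟨k, hk⟩
  have hf : PySem.Int.floordiv (x * (x + 1)) 2 = (x * (x + 1)) / 2 :=
    PySem.Int.floordiv_eq_ediv_of_pos (by omega)
  unfold lastPos
  rw [hf]
  omega

theorem lastPos_nonneg (x : Int) : 0 ≤ lastPos x := by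
  have h := lastPos_double x
  nlinarith [sq_nonneg (2 * x + 1)]

theorem lastPos_mono {a b : Int} (ha : 0 ≤ a) (hab : a ≤ b) : lastPos a ≤ lastPos b := by
  have h1 := lastPos_double a
  have h2 := lastPos_double b
  nlinarith

-- the loop returns the seeded mid immediately once the interval is empty, whatever the fuel
theorem tLoopF_exit (fuel : Nat) (i left right mid : Int) (h : right < left) :
    tLoopF fuel i left right mid = mid := by
  cases fuel with
  | zero => rfl
  | succ f => simp only [tLoopF]; rw [if_neg (by omega)]

-- A's loop when i ≤ 0: every step moves `right` to mid - 1, ending at mid = 0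
theorem tLoopF_neg (fuel : Nat) (i right mid : Int) (hi : i ≤ 0) (hr : 0 ≤ right)
    (hfuel : right < (fuel : Int)) : tLoopF fuel i 0 right mid = 0 := by
  induction fuel generalizing right mid with
  | zero => omega
  | succ f ih =>
    simp only [tLoopF]
    rw [if_pos (by omega : (0:Int) ≤ right)]
    have hf : PySem.Int.floordiv (right - 0) 2 = (right - 0) / 2 :=
      PySem.Int.floordiv_eq_ediv_of_pos (by omega)
    simp only [hf]
    set m : Int := 0 + (right - 0) / 2 with hm
    have hm0 : 0 ≤ m := by omega
    have h1 : ¬ (lastPos m ≥ i ∧ i > lastPos (m - 1)) := by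
      rintro ⟨-, h⟩
      exact absurd h (by have := lastPos_nonneg (m - 1); omega)
    have h2 : ¬ (lastPos m < i) := by
      have := lastPos_nonneg m; omega
    rw [if_neg h1, if_neg h2]
    by_cases hm1 : m = 0
    · rw [tLoopF_exit f i 0 (m - 1) m (by omega)]
      exact hm1
    · exact ih (m - 1) m (by omega) (by push_cast at hfuel ⊢; omega)

-- A's loop when i is beyond lastPos right: every step moves `left`, ending at mid = right
theorem tLoopF_cap (fuel : Nat) (i left right mid : Int) (hcap : lastPos right < i)
    (hl : 0 ≤ left) (hlr : left ≤ right) (hfuel : right - left < (fuel : Int)) :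
    tLoopF fuel i left right mid = right := by
  induction fuel generalizing left mid with
  | zero => omega
  | succ f ih =>
    simp only [tLoopF]
    rw [if_pos hlr]
    have hf : PySem.Int.floordiv (right - left) 2 = (right - left) / 2 :=
      PySem.Int.floordiv_eq_ediv_of_pos (by omega)
    simp only [hf]
    set m : Int := left + (right - left) / 2 with hm
    have hmb : left ≤ m ∧ m ≤ right := by omega
    have hmlt : lastPos m < i := by
      have := lastPos_mono (a := m) (b := right) (by omega) (by omega); omega
    have h1 : ¬ (lastPos m ≥ i ∧ i > lastPos (m - 1)) := by rintro ⟨h, -⟩; omega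
    rw [if_neg h1, if_pos hmlt]
    by_cases hmr : m = right
    · rw [tLoopF_exit f i (m + 1) right m (by omega)]
      exact hmr
    · exact ih (m + 1) m (by omega) (by omega) (by push_cast at hfuel ⊢; omega)

-- A's loop finds the unique crossing point x of the triangular numbers
theorem tLoopF_find (fuel : Nat) (i left right mid x : Int) (hx1 : 1 ≤ x)
    (hxi : i ≤ lastPos x) (hxi1 : lastPos (x - 1) < i)
    (hl : 0 ≤ left) (hlx : left ≤ x) (hxr : x ≤ right)
    (hfuel : right - left < (fuel : Int)) :
    tLoopF fuel i left right mid = x := by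
  have hi1 : 1 ≤ i := by have := lastPos_nonneg (x - 1); omega
  induction fuel generalizing left right mid with
  | zero => omega
  | succ f ih =>
    simp only [tLoopF]
    rw [if_pos (by omega : left ≤ right)]
    have hf : PySem.Int.floordiv (right - left) 2 = (right - left) / 2 :=
      PySem.Int.floordiv_eq_ediv_of_pos (by omega)
    simp only [hf]
    set m : Int := left + (right - left) / 2 with hm
    have hmb : left ≤ m ∧ m ≤ right := by omega
    by_cases hc1 : lastPos m ≥ i ∧ i > lastPos (m - 1)
    · rw [if_pos hc1]
      -- uniqueness of the crossing point
      rcases lt_trichotomy m x with h | h | h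
      · exfalso
        have : lastPos m ≤ lastPos (x - 1) := lastPos_mono (by omega) (by omega)
        omega
      · exact h
      · exfalso
        have : lastPos x ≤ lastPos (m - 1) := lastPos_mono (by omega) (by omega)
        omega
    · rw [if_neg hc1]
      by_cases hc2 : lastPos m < i
      · rw [if_pos hc2]
        have hxm : m < x := by
          by_contra h
          have : lastPos x ≤ lastPos m := lastPos_mono (by omega) (by omega)
          omega
        exact ih (m + 1) right m (by omega) (by omega) hxr (by push_cast at hfuel ⊢; omega)
      · rw [if_neg hc2]
        -- here lastPos m ≥ i and i ≤ lastPos (m - 1); hence m ≥ 1 and x < m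
        have hm1 : 1 ≤ m := by
          by_contra h
          have hm0 : m = 0 := by omega
          have hz : lastPos m = 0 := by
            have h2 := lastPos_double m
            rw [hm0] at h2 ⊢
            omega
          omega
        have hge : i ≤ lastPos (m - 1) := by
          rcases not_and_or.mp hc1 with h | h <;> omega
        have hxm : x < m := by
          by_contra h
          have : lastPos (m - 1) ≤ lastPos (x - 1) := lastPos_mono (by omega) (by omega)
          omega
        exact ih left (m - 1) m hl hlx (by omega) (by push_cast at hfuel ⊢; omega)

-- correctness of Source B's digit-by-digit integer square root
theorem chainF_fold_spec (fuel : Nat) (n : Int) (hn : 0 ≤ n) (hfuel : n.toNat ≤ fuel) :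
    0 ≤ ((chainF fuel n).reverse).foldl stepIsq 0 ∧
      ((chainF fuel n).reverse).foldl stepIsq 0 * ((chainF fuel n).reverse).foldl stepIsq 0 ≤ n ∧
      n < (((chainF fuel n).reverse).foldl stepIsq 0 + 1) * (((chainF fuel n).reverse).foldl stepIsq 0 + 1) := by
  induction fuel generalizing n with
  | zero =>
    have : n = 0 := by omega
    subst this
    simp [chainF]
  | succ f ih =>
    simp only [chainF]
    by_cases h : 0 < n
    · rw [if_pos h]
      have hf : PySem.Int.floordiv n 4 = n / 4 := PySem.Int.floordiv_eq_ediv_of_pos (by omega)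
      rw [hf]
      obtain ⟨hr0, hr1, hr2⟩ := ih (n / 4) (by omega) (by omega)
      set r : Int := ((chainF f (n / 4)).reverse).foldl stepIsq 0 with hr
      rw [List.reverse_cons, List.foldl_append, List.foldl_cons, List.foldl_nil, ← hr]
      have hd : 4 * (n / 4) ≤ n ∧ n < 4 * (n / 4) + 4 := by omega
      unfold stepIsq
      by_cases hc : (2 * r + 1) * (2 * r + 1) ≤ n
      · rw [if_pos hc]
        refine ⟨by omega, hc, ?_⟩
        nlinarith
      · rw [if_neg hc]
        exact ⟨by omega, by nlinarith, by omega⟩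
    · rw [if_neg h]
      have : n = 0 := by omega
      subst this
      simp

theorem isqB_spec (n : Int) (hn : 0 ≤ n) :
    0 ≤ isqB n ∧ isqB n * isqB n ≤ n ∧ n < (isqB n + 1) * (isqB n + 1) :=
  chainF_fold_spec n.toNat n hn le_rfl

-- tB's value for positive i: min of the triangular crossing point with A's search cap
theorem tB_char (i : Int) (hi : 1 ≤ i) :
    ∃ x : Int, tB i = min x (2 ^ 61) ∧ 1 ≤ x ∧ i ≤ lastPos x ∧ lastPos (x - 1) < i := by
  rw [tB, if_neg (by omega : ¬ i ≤ 0)]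
  obtain ⟨hs0, hs1, hs2⟩ := isqB_spec (8 * i + 1) (by omega)
  set s : Int := isqB (8 * i + 1) with hs
  have hf : PySem.Int.floordiv (s - 1) 2 = (s - 1) / 2 :=
    PySem.Int.floordiv_eq_ediv_of_pos (by omega)
  simp only [hf]
  set x0 : Int := (s - 1) / 2 with hx0
  have hsx : 2 * x0 ≤ s - 1 ∧ s - 1 ≤ 2 * x0 + 1 := by omega
  have hspos : 1 ≤ s := by nlinarith
  have hx00 : 0 ≤ x0 := by omega
  have hT0 := lastPos_double x0
  by_cases hc : PySem.Int.floordiv (x0 * (x0 + 1)) 2 < i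
  · -- bump: answer is x0 + 1
    have hc' : lastPos x0 < i := hc
    refine ⟨x0 + 1, by rw [if_pos hc], by omega, ?_, by simpa using hc'⟩
    have hT1 := lastPos_double (x0 + 1)
    nlinarith
  · have hc' : ¬ lastPos x0 < i := hc
    refine ⟨x0, by rw [if_neg hc], ?_, by omega, ?_⟩
    · -- x0 ≥ 1 since lastPos 0 = 0 < i
      by_contra h
      have hx0z : x0 = 0 := by omega
      have : lastPos x0 = 0 := by
        have := lastPos_double x0; rw [hx0z] at this ⊢; omega
      omega
    · have hx01 : 1 ≤ x0 := by
        by_contra h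
        have hx0z : x0 = 0 := by omega
        have : lastPos x0 = 0 := by
          have := lastPos_double x0; rw [hx0z] at this ⊢; omega
        omega
      have hT1 := lastPos_double (x0 - 1)
      nlinarith

theorem t_eq (i : Int) : tA i = tB i := by
  by_cases hi : i ≤ 0
  · rw [tA, tLoopF_neg (2 ^ 61 + 1) i (2 ^ 61) 0 hi (by norm_num) (by norm_num), tB,
      if_pos hi]
  · obtain ⟨x, hx, hx1, hxi, hxi1⟩ := tB_char i (by omega)
    rw [tA, hx]
    by_cases hcap : x ≤ 2 ^ 61
    · rw [tLoopF_find (2 ^ 61 + 1) i 0 (2 ^ 61) 0 x hx1 hxi hxi1 le_rfl (by omega) hcap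
        (by norm_num)]
      omega
    · have : lastPos (2 ^ 61) < i := by
        have := lastPos_mono (a := 2 ^ 61) (b := x - 1) (by norm_num) (by omega)
        omega
      rw [tLoopF_cap (2 ^ 61 + 1) i 0 (2 ^ 61) 0 this le_rfl (by norm_num) (by norm_num)]
      omega

theorem foldl_step_congr (l : List String) (a : Int) :
    l.foldl (fun answer token => stepB token answer) a =
      l.foldl
        (fun answer token =>
          if token = "E" then eA answer
          else if token = "O" then oA answer
          else if token = "T" then tA answer
          else answer) a := by
  induction l generalizing a with
  | nil => rfl
  | cons tok rest ih =>
    simp only [List.foldl_cons, ih]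
    congr 1
    unfold stepB eA oA
    split_ifs <;> simp [t_eq]

-- ===== VERDICT (by name: the statement is the Claim_ definition above) =====
theorem solve_spec : Claim_equal_solve := by
  intro tokens i _
  unfold Spec_solve solve solve_alt
  rw [PySem.List.slice?_none_none_neg_one]
  simp only [Option.getD_some]
  exact (foldl_step_congr tokens.reverse i).symm
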